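-- pv_equiv track=rewrite | github.com/skibinstein/modules | yaml_to_tfvars.py | _generate_variables_tf
-- ===== SOURCE A (Python) =====
-- def _generate_variables_tf(data: dict, module_keys: list[str]) -> str:
--     lines: list[str] = []
--     lines.append('variable "project_id" {')
--     lines.append("  type = string")
--     lines.append("}")
--     lines.append("")
--     lines.append('variable "region" {')
--     lines.append("  type = string")
--     lines.append("}")
--     if "env" in data:
--         lines.append("")
--         lines.append('variable "env" {')
--         lines.append("  type = string")
--         lines.append("}")
--     for key in module_keys:
--         lines.append("")
--         lines.append(f'variable "{key}" {{')
--         lines.append("  type = any")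
--         lines.append("}")
--     return "\n".join(lines)
-- ===== SOURCE B (Python) =====
-- def _generate_variables_tf(data: dict, module_keys: list[str]) -> str:
--     specs = [("project_id", "string"), ("region", "string")]
--     if "env" in data:
--         specs.append(("env", "string"))
--     specs.extend((key, "any") for key in module_keys)
--     return "\n\n".join(
--         'variable "%s" {\n  type = %s\n}' % (name, typ) for name, typ in specs
--     )
-- ===== Notes on version B (the rewrite author's own statement) =====
-- stated objective: simpler
-- what changed: Replaces the hand-maintained flat line list (with explicit blank-line separator lines and a duplicated three-line block pattern in three places) by one (name,type) spec table rendered through a single block template and joined with '\n\n'.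
import Mathlib
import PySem

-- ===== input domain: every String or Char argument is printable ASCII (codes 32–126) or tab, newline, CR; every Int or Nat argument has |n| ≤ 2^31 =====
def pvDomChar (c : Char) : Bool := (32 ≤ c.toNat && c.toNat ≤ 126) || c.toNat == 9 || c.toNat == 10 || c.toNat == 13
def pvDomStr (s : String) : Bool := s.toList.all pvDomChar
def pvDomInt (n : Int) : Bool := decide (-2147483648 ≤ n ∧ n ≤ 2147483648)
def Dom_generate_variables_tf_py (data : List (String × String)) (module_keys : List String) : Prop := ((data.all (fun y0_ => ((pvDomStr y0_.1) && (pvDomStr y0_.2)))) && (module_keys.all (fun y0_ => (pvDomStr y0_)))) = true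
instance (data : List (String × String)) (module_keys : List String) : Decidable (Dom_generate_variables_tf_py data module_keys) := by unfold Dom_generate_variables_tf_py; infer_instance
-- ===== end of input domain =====

-- B replaces A's hand-maintained flat line list (blank separator lines, the 3-line block pattern
-- written out three times) by one (name,type) spec table rendered through a single block template
-- and joined with "\n\n"; objective: simpler.

-- ===== PORT A =====
def generate_variables_tf_py (data : List (String × String)) (module_keys : List String) : String :=
  let lines : List String := []
  let lines := lines ++ ["variable \"project_id\" {"]
  let lines := lines ++ ["  type = string"]
  let lines := lines ++ ["}"]
  let lines := lines ++ [""]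
  let lines := lines ++ ["variable \"region\" {"]
  let lines := lines ++ ["  type = string"]
  let lines := lines ++ ["}"]
  let lines := if data.any (fun p => p.1 == "env") then
      ((((lines ++ [""]) ++ ["variable \"env\" {"]) ++ ["  type = string"]) ++ ["}"])
    else lines
  let lines := module_keys.foldl (fun lines key =>
      ((((lines ++ [""]) ++ ["variable \"" ++ key ++ "\" {"]) ++ ["  type = any"]) ++ ["}"])) lines
  PySem.Str.join "\n" lines

-- ===== PORT B =====
-- renders one (name, type) spec into its variable block ('variable "%s" {\n  type = %s\n}')
def pvRenderSpec (spec : String × String) : String :=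
  "variable \"" ++ spec.1 ++ "\" {\n  type = " ++ spec.2 ++ "\n}"

def generate_variables_tf_py_alt (data : List (String × String)) (module_keys : List String) : String :=
  let specs : List (String × String) :=
    ([("project_id", "string"), ("region", "string")]
      ++ (if data.any (fun p => p.1 == "env") then [("env", "string")] else []))
      ++ module_keys.map (fun key => (key, "any"))
  PySem.Str.join "\n\n" (specs.map pvRenderSpec)

-- ===== PRECONDITION & SPEC =====
def Spec_generate_variables_tf_py (data : List (String × String)) (module_keys : List String) (out : String) : Prop := out = generate_variables_tf_py_alt data module_keys
instance (data : List (String × String)) (module_keys : List String) (out : String) : Decidable (Spec_generate_variables_tf_py data module_keys out) := by unfold Spec_generate_variables_tf_py; infer_instance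

-- ===== CLAIM (what is proved, stated in full; the proofs are below) =====
def Claim_equal_generate_variables_tf_py : Prop := ∀ (data : List (String × String)) (module_keys : List String), Dom_generate_variables_tf_py data module_keys → Spec_generate_variables_tf_py data module_keys (generate_variables_tf_py data module_keys)

-- ===== LEMMAS AND PROOFS =====

theorem pvChars_join_append (sep : List Char) (l1 l2 : List (List Char))
    (h1 : l1 ≠ []) (h2 : l2 ≠ []) :
    PySem.Chars.join sep (l1 ++ l2) = PySem.Chars.join sep l1 ++ sep ++ PySem.Chars.join sep l2 := by
  induction l1 with
  | nil => exact absurd rfl h1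
  | cons a l1 ih =>
    cases l1 with
    | nil =>
      cases l2 with
      | nil => exact absurd rfl h2
      | cons b l2 =>
        simp [PySem.Chars.join_cons_cons, PySem.Chars.join_singleton]
    | cons a' l1' =>
      have := ih (by simp)
      simp only [List.cons_append] at this ⊢
      rw [PySem.Chars.join_cons_cons, PySem.Chars.join_cons_cons, this]
      simp [List.append_assoc]

theorem pvStr_join_append (sep : String) (l1 l2 : List String)
    (h1 : l1 ≠ []) (h2 : l2 ≠ []) :
    PySem.Str.join sep (l1 ++ l2) = PySem.Str.join sep l1 ++ sep ++ PySem.Str.join sep l2 := by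
  apply String.toList_inj.mp
  simp only [String.toList_append, PySem.Str.toList_join, List.map_append]
  exact pvChars_join_append sep.toList (l1.map String.toList) (l2.map String.toList)
    (by simpa using h1) (by simpa using h2)

-- appending one block to a nonempty "\n\n"-joined list
theorem pvJoin2_snoc (blocks : List String) (hb : blocks ≠ []) (b : String) :
    PySem.Str.join "\n\n" (blocks ++ [b]) = PySem.Str.join "\n\n" blocks ++ "\n\n" ++ b := by
  rw [pvStr_join_append "\n\n" blocks [b] hb (by simp)]
  apply String.toList_inj.mp
  simp [PySem.Str.toList_join, PySem.Chars.join, List.intercalate]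

-- appending one 4-line group (blank separator + 3 block lines) to a nonempty "\n"-joined list
theorem pvJoin1_snoc4 (lines : List String) (hl : lines ≠ []) (x y z : String) :
    PySem.Str.join "\n" (((lines ++ [""]) ++ [x] ++ [y]) ++ [z])
      = PySem.Str.join "\n" lines ++ "\n\n" ++ (x ++ "\n" ++ y ++ "\n" ++ z) := by
  have : ((lines ++ [""]) ++ [x] ++ [y]) ++ [z] = lines ++ ["", x, y, z] := by simp
  rw [this, pvStr_join_append "\n" lines ["", x, y, z] hl (by simp)]
  apply String.toList_inj.mp
  simp [PySem.Str.toList_join, PySem.Chars.join, List.intercalate]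

theorem pvRenderSpec_any (k : String) :
    pvRenderSpec (k, "any")
      = ("variable \"" ++ k ++ "\" {") ++ "\n" ++ "  type = any" ++ "\n" ++ "}" := by
  apply String.toList_inj.mp
  simp [pvRenderSpec]

theorem pvLoop (keys lines blocks : List String) (hl : lines ≠ []) (hb : blocks ≠ [])
    (h : PySem.Str.join "\n" lines = PySem.Str.join "\n\n" blocks) :
    PySem.Str.join "\n" (keys.foldl (fun lines key =>
        ((((lines ++ [""]) ++ ["variable \"" ++ key ++ "\" {"]) ++ ["  type = any"]) ++ ["}"])) lines)
      = PySem.Str.join "\n\n" (blocks ++ keys.map (fun key => pvRenderSpec (key, "any"))) := by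
  induction keys generalizing lines blocks with
  | nil => simpa using h
  | cons k ks ih =>
    simp only [List.foldl_cons, List.map_cons]
    have hstep : PySem.Str.join "\n"
        ((((lines ++ [""]) ++ ["variable \"" ++ k ++ "\" {"]) ++ ["  type = any"]) ++ ["}"])
        = PySem.Str.join "\n\n" (blocks ++ [pvRenderSpec (k, "any")]) := by
      rw [pvJoin1_snoc4 lines hl, h, pvJoin2_snoc blocks hb, pvRenderSpec_any]
    have := ih ((((lines ++ [""]) ++ ["variable \"" ++ k ++ "\" {"]) ++ ["  type = any"]) ++ ["}"])
      (blocks ++ [pvRenderSpec (k, "any")]) (by simp) (by simp) hstep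
    simpa [List.append_assoc] using this

-- ===== VERDICT (by name: the statement is the Claim_ definition above) =====
theorem generate_variables_tf_py_spec : Claim_equal_generate_variables_tf_py := by
  unfold Claim_equal_generate_variables_tf_py
  intro data module_keys _
  unfold Spec_generate_variables_tf_py generate_variables_tf_py generate_variables_tf_py_alt
  simp only [List.nil_append]
  by_cases henv : data.any (fun p => p.1 == "env")
  · simp only [henv, if_true, List.map_append, List.map_map, Function.comp_def]
    apply pvLoop module_keys
    · simp
    · simp
    · decide
  · simp only [henv, List.map_append, List.map_map, Function.comp_def]
    apply pvLoop module_keys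
    · simp
    · simp
    · decide
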